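-- pv_equiv track=rewrite | github.com/Astri2/AVLSI-Project-Boolean-function-minimization | step3.py | getUncoveredMinterms
-- ===== SOURCE A (Python) =====
-- def getUncoveredMinterms(currentImplicants, chart, minterms):
--     covered = [False] * len(minterms)
--
--     # for each minterm, check that it is covered by the current implicants
--     for imp in currentImplicants:
--         row = chart[imp]
--         for i, v in enumerate(row):
--             if v == "1":
--                 covered[i] = True
--
--     # return the indices of the uncovered minterms
--     return [i for i, c in enumerate(covered) if not c]
-- ===== SOURCE B (Python) =====
-- def getUncoveredMinterms(currentImplicants, chart, minterms):
--     rows = [chart[imp] for imp in currentImplicants]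
--     return [i for i in range(len(minterms))
--             if not any(i < len(row) and row[i] == "1" for row in rows)]
-- ===== Notes on version B (the rewrite author's own statement) =====
-- stated objective: alternative
-- what changed: B drops the mutable covered boolean table entirely: it fetches each implicant's row once, then for each minterm index decides coverage column-wise by a short-circuit scan of the rows, instead of A's row-major marking pass over a shared array.
import Mathlib
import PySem

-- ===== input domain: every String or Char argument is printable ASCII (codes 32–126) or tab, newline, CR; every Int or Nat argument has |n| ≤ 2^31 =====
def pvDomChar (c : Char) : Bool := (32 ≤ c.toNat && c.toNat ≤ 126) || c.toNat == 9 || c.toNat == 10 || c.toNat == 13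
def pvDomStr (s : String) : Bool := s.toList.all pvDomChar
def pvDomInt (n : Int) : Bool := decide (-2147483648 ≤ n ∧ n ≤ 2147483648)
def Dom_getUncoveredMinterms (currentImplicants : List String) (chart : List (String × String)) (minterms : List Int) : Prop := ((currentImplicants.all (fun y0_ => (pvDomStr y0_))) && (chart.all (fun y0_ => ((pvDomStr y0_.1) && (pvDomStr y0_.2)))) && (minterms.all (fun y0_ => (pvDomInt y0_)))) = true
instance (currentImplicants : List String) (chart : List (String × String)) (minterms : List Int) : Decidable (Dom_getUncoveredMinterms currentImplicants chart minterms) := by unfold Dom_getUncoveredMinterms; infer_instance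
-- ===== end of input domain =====

-- B drops A's mutable covered table: rows are fetched once and each minterm index is decided by a
-- column-wise short-circuit scan of the rows (alternative decomposition, same asymptotic cost).


-- row = chart[imp], as a char list; the getD "" default is only reached outside Pre_ (KeyError)
def pvRowChars (chart : List (String × String)) (imp : String) : List Char :=
  (((PySem.Dict.mk chart).get? imp).getD "").toList

-- ===== PORT A =====
def getUncoveredMinterms (currentImplicants : List String) (chart : List (String × String)) (minterms : List Int) : List Int :=
  let covered : List Bool := List.replicate minterms.length false
  let covered := currentImplicants.foldl (fun cov imp =>
    let row := pvRowChars chart imp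
    (PySem.List.enumerate row).foldl
      (fun cv p => if p.2 = '1' then PySem.List.pySetD cv p.1 true else cv) cov) covered
  (PySem.List.enumerate covered).foldl
    (fun acc p => if !p.2 then acc ++ [p.1] else acc) ([] : List Int)

-- ===== PORT B =====
def getUncoveredMinterms_alt (currentImplicants : List String) (chart : List (String × String)) (minterms : List Int) : List Int :=
  let rows := currentImplicants.map (fun imp => pvRowChars chart imp)
  (PySem.List.pyRange 0 (minterms.length : Int) 1).filter
    (fun i => !(rows.any (fun row =>
      decide (i < (row.length : Int)) && (PySem.List.pyGetD row i ' ' == '1'))))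

-- ===== PRECONDITION & SPEC =====
def pvKeysOk (currentImplicants : List String) (chart : List (String × String)) : Bool :=
  currentImplicants.all (fun imp => (PySem.Dict.mk chart).contains imp)
def pvOnesOk (currentImplicants : List String) (chart : List (String × String)) (minterms : List Int) : Bool :=
  currentImplicants.all (fun imp =>
    (pvRowChars chart imp).zipIdx.all (fun p => !(p.1 == '1') || decide (p.2 < minterms.length)))

-- Pre_ excludes exactly the inputs where Python A raises: a KeyError (an implicant missing from
-- chart) or an IndexError (a '1' in a row at an index ≥ len(minterms)).
def Pre_getUncoveredMinterms (currentImplicants : List String) (chart : List (String × String)) (minterms : List Int) : Prop :=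
  (pvKeysOk currentImplicants chart && pvOnesOk currentImplicants chart minterms) = true
instance (currentImplicants : List String) (chart : List (String × String)) (minterms : List Int) : Decidable (Pre_getUncoveredMinterms currentImplicants chart minterms) := by unfold Pre_getUncoveredMinterms; infer_instance

def pvWitness_getUncoveredMinterms : List String × (List (String × String)) × List Int :=
  (["a"], [("a", "1")], [5])

def Spec_getUncoveredMinterms (currentImplicants : List String) (chart : List (String × String)) (minterms : List Int) (out : List Int) : Prop := out = getUncoveredMinterms_alt currentImplicants chart minterms
instance (currentImplicants : List String) (chart : List (String × String)) (minterms : List Int) (out : List Int) : Decidable (Spec_getUncoveredMinterms currentImplicants chart minterms out) := by unfold Spec_getUncoveredMinterms; infer_instance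

-- ===== CLAIM (what is proved, stated in full; the proofs are below) =====
def Claim_equal_getUncoveredMinterms : Prop := ∀ (currentImplicants : List String) (chart : List (String × String)) (minterms : List Int), Dom_getUncoveredMinterms currentImplicants chart minterms → Pre_getUncoveredMinterms currentImplicants chart minterms → Spec_getUncoveredMinterms currentImplicants chart minterms (getUncoveredMinterms currentImplicants chart minterms)
-- ===== LEMMAS AND PROOFS =====
lemma inner_length (e : List (Int × Char)) : ∀ (cv : List Bool),
    (e.foldl (fun cv p => if p.2 = '1' then PySem.List.pySetD cv p.1 true else cv) cv).length
      = cv.length := by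
  induction e with
  | nil => intro cv; rfl
  | cons a l ih =>
    intro cv
    simp only [List.foldl_cons, ih]
    split
    · simp [PySem.List.length_pySetD]
    · rfl

lemma inner_getD (row : List Char) : ∀ (s : Nat) (cv : List Bool) (j : Nat),
    ((PySem.List.enumerate row (s : Int)).foldl
        (fun cv p => if p.2 = '1' then PySem.List.pySetD cv p.1 true else cv) cv).getD j false
      = (cv.getD j false ||
          (decide (j < cv.length) && decide (s ≤ j) && decide (j - s < row.length) &&
            (row.getD (j - s) ' ' == '1'))) := by
  induction row with
  | nil => intro s cv j; simp [PySem.List.enumerate_nil]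
  | cons a l ih =>
    intro s cv j
    rw [PySem.List.enumerate_cons]
    have hc : (s : Int) + 1 = ((s + 1 : Nat) : Int) := by push_cast; ring
    rw [List.foldl_cons, hc]
    by_cases ha : a = '1'
    · simp only [ha, reduceIte, PySem.List.pySetD_natCast, ih, List.length_set]
      by_cases hjs : j = s
      · subst hjs
        by_cases hlt : j < cv.length
        · simp [List.getD, List.getElem?_set, hlt]
        · simp [List.getD, hlt]
      · have hne : s ≠ j := fun h => hjs h.symm
        rw [List.getD, List.getElem?_set_ne hne]
        by_cases hsj : s ≤ j
        · have h1 : s + 1 ≤ j := by omega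
          have h2 : j - s = (j - (s+1)) + 1 := by omega
          simp [hsj, h1, h2, List.getD]
        · have h1 : ¬ (s + 1 ≤ j) := by omega
          simp [hsj, h1, List.getD]
    · simp only [if_neg ha, ih]
      by_cases hsj : s ≤ j
      · by_cases hjs : j = s
        · subst hjs
          have h1 : ¬ (j + 1 ≤ j) := by omega
          simp [h1, List.getD, ha]
        · have h1 : s + 1 ≤ j := by omega
          have h2 : j - s = (j - (s+1)) + 1 := by omega
          simp [hsj, h1, h2, List.getD]
      · have h1 : ¬ (s + 1 ≤ j) := by omega
        simp [hsj, h1]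

lemma outer_length (chart : List (String × String)) (ci : List String) : ∀ (cv : List Bool),
    (ci.foldl (fun cov imp =>
        (PySem.List.enumerate (pvRowChars chart imp)).foldl
          (fun cv p => if p.2 = '1' then PySem.List.pySetD cv p.1 true else cv) cov) cv).length
      = cv.length := by
  induction ci with
  | nil => intro cv; rfl
  | cons a l ih =>
    intro cv
    rw [List.foldl_cons, ih]
    exact inner_length _ cv

lemma outer_getD (chart : List (String × String)) (ci : List String) : ∀ (cv : List Bool) (j : Nat),
    ((ci.foldl (fun cov imp =>
        (PySem.List.enumerate (pvRowChars chart imp)).foldl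
          (fun cv p => if p.2 = '1' then PySem.List.pySetD cv p.1 true else cv) cov) cv).getD j false)
      = (cv.getD j false ||
          (decide (j < cv.length) && ci.any (fun imp =>
            decide (j < (pvRowChars chart imp).length) && ((pvRowChars chart imp).getD j ' ' == '1')))) := by
  induction ci with
  | nil => intro cv j; simp
  | cons a l ih =>
    intro cv j
    rw [List.foldl_cons, ih]
    have h0 : PySem.List.enumerate (pvRowChars chart a)
        = PySem.List.enumerate (pvRowChars chart a) ((0:Nat):Int) := by norm_num
    rw [h0, inner_getD, inner_length]
    by_cases hlt : j < cv.length
    · simp [hlt, Bool.or_assoc, Bool.and_or_distrib_left]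
    · simp [hlt]

lemma ports_agree (ci : List String) (chart : List (String × String)) (m : List Int) :
    getUncoveredMinterms ci chart m = getUncoveredMinterms_alt ci chart m := by
  simp only [getUncoveredMinterms, getUncoveredMinterms_alt]
  set n := m.length with hn
  set C := ci.foldl (fun cov imp =>
        (PySem.List.enumerate (pvRowChars chart imp)).foldl
          (fun cv p => if p.2 = '1' then PySem.List.pySetD cv p.1 true else cv) cov)
        (List.replicate n false) with hC
  have hlen : C.length = n := by rw [hC, outer_length]; simp
  have hget : ∀ j : Nat, j < n → C.getD j false
      = ci.any (fun imp => decide (j < (pvRowChars chart imp).length)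
          && ((pvRowChars chart imp).getD j ' ' == '1')) := by
    intro j hj
    rw [hC, outer_getD]
    simp [hj]
  rw [PySem.List.foldl_append_if, List.nil_append,
      PySem.List.enumerate_eq_map_pyRange C false, List.filter_map, List.map_map]
  have hlenI : PySem.List.len C = (n : Int) := by simp [hlen]
  rw [hlenI]
  have hid : (Prod.fst ∘ fun j => (j, PySem.List.pyGetD C j false)) = id := rfl
  rw [hid, List.map_id]
  apply List.filter_congr
  intro i hi
  rw [PySem.List.mem_pyRange_one] at hi
  obtain ⟨h0, h1⟩ := hi
  lift i to Nat using h0 with k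
  have hk : k < n := by exact_mod_cast h1
  simp only [Function.comp_apply, PySem.List.pyGetD_natCast, hget k hk, List.any_map,
    Nat.cast_lt]
  rfl

-- ===== VERDICT (by name: the statement is the Claim_ definition above) =====
theorem getUncoveredMinterms_spec : Claim_equal_getUncoveredMinterms := by
  intro ci chart m _ _
  unfold Spec_getUncoveredMinterms
  exact ports_agree ci chart m
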